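-- pv_equiv track=rewrite | github.com/deppinto/RheoCell | scripts/plot/plot.py | first_min
-- ===== SOURCE A (Python) =====
-- def first_min(u):
--     """
--     compute the location and value of the first minimum of a set of data
--     """
--
--     index = 0
--     value = u[0]
--
--     for i in range(len(u)):
--         if u[i] < value:
--             index = i
--             value = u[i]
--         elif u[i] >= value:
--             continue
--
--     return index,value
-- ===== SOURCE B (Python) =====
-- def first_min(u):
--     """
--     compute the location and value of the first minimum of a set of data
--     """
--     value = u[0]          # empty input raises IndexError, as in the scan version
--     value = min(u)
--     index = u.index(value)
--     return index, value
-- ===== Notes on version B (the rewrite author's own statement) =====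
-- stated objective: simpler
-- what changed: Replaced the interleaved running-minimum index scan with two library passes: value = min(u), then index = u.index(value).
import Mathlib
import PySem

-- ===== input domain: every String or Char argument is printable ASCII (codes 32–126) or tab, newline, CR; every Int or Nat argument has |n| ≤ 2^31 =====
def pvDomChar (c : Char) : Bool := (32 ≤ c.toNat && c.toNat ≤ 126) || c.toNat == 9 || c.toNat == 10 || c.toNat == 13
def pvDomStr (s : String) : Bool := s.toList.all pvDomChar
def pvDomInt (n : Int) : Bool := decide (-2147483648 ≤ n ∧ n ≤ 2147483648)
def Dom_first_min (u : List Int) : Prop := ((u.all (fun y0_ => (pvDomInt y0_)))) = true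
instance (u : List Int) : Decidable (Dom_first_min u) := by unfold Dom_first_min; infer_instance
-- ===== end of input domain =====

-- B replaces A's single interleaved running-minimum scan by two library passes (min, then first index); objective: simpler.


-- ===== PORT A =====
-- index = 0; value = u[0]; for i in range(len(u)): if u[i] < value: index, value = i, u[i]
-- u[i] inside the loop is always in range, so pyGetD is exact there.
def first_min (u : List Int) : Int × Int :=
  match PySem.List.pyGet? u 0 with
  | none => (0, 0)   -- IndexError in Python; outside Pre_
  | some v0 =>
    (PySem.List.pyRange 0 (PySem.List.len u) 1).foldl
      (fun (s : Int × Int) i =>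
        if PySem.List.pyGetD u i 0 < s.2 then (i, PySem.List.pyGetD u i 0) else s)
      (0, v0)

-- ===== PORT B =====
-- value = u[0]; value = min(u); index = u.index(value); return index, value
def first_min_alt (u : List Int) : Int × Int :=
  match PySem.List.pyGet? u 0 with
  | none => (0, 0)   -- IndexError in Python; outside Pre_
  | some v0 =>
    let value := (PySem.List.min? u (fun x => x)).getD v0
    let index : Int := ((PySem.List.index? u value).getD 0 : Nat)
    (index, value)

-- ===== PRECONDITION & SPEC =====
-- A raises IndexError on the empty list (u[0]); exactly those inputs are excluded.
def Pre_first_min (u : List Int) : Prop := u ≠ []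
instance (u : List Int) : Decidable (Pre_first_min u) := by unfold Pre_first_min; infer_instance
def pvWitness_first_min : List Int := [3, 1, 2, 1]
def Spec_first_min (u : List Int) (out : Int × Int) : Prop := out = first_min_alt u
instance (u : List Int) (out : Int × Int) : Decidable (Spec_first_min u out) := by unfold Spec_first_min; infer_instance

-- ===== CLAIM (what is proved, stated in full; the proofs are below) =====
def Claim_equal_first_min : Prop := ∀ (u : List Int), Dom_first_min u → Pre_first_min u → Spec_first_min u (first_min u)

-- ===== LEMMAS AND PROOFS =====

-- the minimum accumulated by foldl min is either the seed or an element of the list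
theorem pv_foldl_min_mem (xs : List Int) : ∀ v : Int, xs.foldl min v = v ∨ xs.foldl min v ∈ xs := by
  induction xs with
  | nil => intro v; left; rfl
  | cons x t ih =>
    intro v
    rcases ih (min v x) with h | h
    · simp only [List.foldl_cons, h]
      rcases le_total v x with hle | hle
      · left; simp [min_eq_left hle]
      · right; simp [min_eq_right hle]
    · right; simp [List.foldl_cons, h]

theorem pv_foldl_min_le (xs : List Int) : ∀ v : Int, xs.foldl min v ≤ v := by
  induction xs with
  | nil => intro v; exact le_refl v
  | cons x t ih =>
    intro v
    exact le_trans (ih (min v x)) (min_le_left v x)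

-- A's loop body, as a step on pairs (index, value)
def pvStep (s : Int × Int) (p : Int × Int) : Int × Int :=
  if p.2 < s.2 then (p.1, p.2) else s

-- characterisation of A's fold over an enumerated tail
theorem pv_loop_char (t : List Int) : ∀ (s i v : Int),
    (PySem.List.enumerate t s).foldl pvStep (i, v) =
      if t.foldl min v < v
      then (s + (((PySem.List.index? t (t.foldl min v)).getD 0 : Nat) : Int), t.foldl min v)
      else (i, v) := by
  induction t with
  | nil => intro s i v; simp [PySem.List.enumerate_nil]
  | cons x xs ih =>
    intro s i v
    rw [PySem.List.enumerate_cons, List.foldl_cons]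
    by_cases hx : x < v
    · have hmin : min v x = x := min_eq_right (le_of_lt hx)
      simp only [pvStep, if_pos hx, List.foldl_cons, hmin]
      rw [ih (s + 1) s x]
      by_cases hlt : xs.foldl min x < x
      · have hne : x ≠ xs.foldl min x := (ne_of_lt hlt).symm
        have hltv : xs.foldl min x < v := lt_trans hlt hx
        have hmem : xs.foldl min x ∈ xs := by
          rcases pv_foldl_min_mem xs x with h | h
          · exact absurd h (ne_of_lt hlt)
          · exact h
        rw [if_pos hlt, if_pos hltv, PySem.List.index?_cons_of_ne xs hne]
        obtain ⟨k, hk⟩ := Option.isSome_iff_exists.mp ((PySem.List.index?_isSome_iff xs _).mpr hmem)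
        simp only [PySem.List.index?_eq_idxOf?] at hk
        simp [hk]
        omega
      · have heq : xs.foldl min x = x := le_antisymm (pv_foldl_min_le xs x) (not_lt.mp hlt)
        rw [if_neg hlt, heq, if_pos hx, PySem.List.index?_cons_self]
        simp
    · have hmin : min v x = v := min_eq_left (not_lt.mp hx)
      simp only [pvStep, if_neg hx, List.foldl_cons, hmin]
      rw [ih (s + 1) i v]
      by_cases hlt : xs.foldl min v < v
      · have hne : x ≠ xs.foldl min v := by
          intro h; rw [← h] at hlt; exact hx (lt_of_lt_of_le hlt (le_refl v)) |>.elim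
        have hmem : xs.foldl min v ∈ xs := by
          rcases pv_foldl_min_mem xs v with h | h
          · exact absurd h (ne_of_lt hlt)
          · exact h
        rw [if_pos hlt, if_pos hlt, PySem.List.index?_cons_of_ne xs hne]
        obtain ⟨k, hk⟩ := Option.isSome_iff_exists.mp ((PySem.List.index?_isSome_iff xs _).mpr hmem)
        simp only [PySem.List.index?_eq_idxOf?] at hk
        simp [hk]
        omega
      · rw [if_neg hlt, if_neg hlt]

-- A's fold over the index range is the fold over the enumerated list
theorem pv_first_min_eq_loop (h : Int) (t : List Int) :
    first_min (h :: t) = (PySem.List.enumerate (h :: t) 0).foldl pvStep (0, h) := by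
  have hget : PySem.List.pyGet? (h :: t) 0 = some h := by
    simp [PySem.List.pyGet?, PySem.List.pyIdx?]
  simp only [first_min, hget]
  rw [PySem.List.enumerate_eq_map_pyRange (h :: t) 0, List.foldl_map]
  rfl

-- ===== VERDICT (by name: the statement is the Claim_ definition above) =====
theorem first_min_spec : Claim_equal_first_min := by
  intro u _ hpre
  unfold Spec_first_min
  match u with
  | [] => exact absurd rfl hpre
  | h :: t =>
    rw [pv_first_min_eq_loop h t, PySem.List.enumerate_cons, List.foldl_cons]
    have hstep : pvStep (0, h) ((0 : Int), h) = (0, h) := by simp [pvStep]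
    rw [hstep, pv_loop_char t (0+1) 0 h]
    have hget : PySem.List.pyGet? (h :: t) 0 = some h := by
      simp [PySem.List.pyGet?, PySem.List.pyIdx?]
    simp only [first_min_alt, hget]
    rw [PySem.List.min?_id_cons]
    by_cases hlt : t.foldl min h < h
    · have hne : h ≠ t.foldl min h := (ne_of_lt hlt).symm
      have hmem : t.foldl min h ∈ t := by
        rcases pv_foldl_min_mem t h with hc | hc
        · exact absurd hc (ne_of_lt hlt)
        · exact hc
      rw [if_pos hlt]
      simp only [Option.getD_some]
      rw [PySem.List.index?_cons_of_ne t hne]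
      obtain ⟨k, hk⟩ := Option.isSome_iff_exists.mp ((PySem.List.index?_isSome_iff t _).mpr hmem)
      simp only [PySem.List.index?_eq_idxOf?] at hk
      simp [hk]
      omega
    · have heq : t.foldl min h = h := le_antisymm (pv_foldl_min_le t h) (not_lt.mp hlt)
      rw [if_neg hlt, heq]
      have h0 := PySem.List.index?_cons_self h t
      simp only [PySem.List.index?_eq_idxOf?] at h0
      simp [h0]
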